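-- pv_equiv track=rewrite | github.com/justsvykas/Turing_College | module_1/sprint_2/part_4/piling_up/piling_up.py | validate_pile_creation
-- ===== SOURCE A (Python) =====
-- def validate_pile_creation(cubes, bottom_cube=None):
--     while cubes:
--         longer_cube, cubes = take_longer_cube(cubes)
--         if bottom_cube is None or bottom_cube >= longer_cube:
--             bottom_cube = longer_cube
--         else:
--             return "No"
--
--     return "Yes"
--
-- def take_longer_cube(cubes):
--     if len(cubes) == 1:
--         return int(cubes[0]), []
--     left_cube = int(cubes[0])
--     right_cube = int(cubes[-1])
--     if left_cube >= right_cube: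
--         longer_cube = cubes.pop(0)
--     else:
--         longer_cube = cubes.pop()
--     return int(longer_cube), cubes
-- ===== SOURCE B (Python) =====
-- def validate_pile_creation(cubes, bottom_cube=None):
--     # Two-pointer scan over the untouched list: no list.pop(0), no mutation.
--     # (A mutates its cubes argument via pop; B does not — equivalence is about the return value.)
--     i, j = 0, len(cubes) - 1
--     while i <= j:
--         left, right = cubes[i], cubes[j]
--         if left >= right:
--             cube, i = left, i + 1
--         else:
--             cube, j = right, j - 1
--         if bottom_cube is not None and bottom_cube < cube:
--             return "No"
--         bottom_cube = cube
--     return "Yes"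
-- ===== Notes on version B (the rewrite author's own statement) =====
-- stated objective: alternative
-- what changed: Replaces A's repeated cubes.pop(0)/pop() on a shrinking, mutated list with a two-pointer index scan over the unchanged list (A also mutates its cubes argument; B does not).
import Mathlib
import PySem

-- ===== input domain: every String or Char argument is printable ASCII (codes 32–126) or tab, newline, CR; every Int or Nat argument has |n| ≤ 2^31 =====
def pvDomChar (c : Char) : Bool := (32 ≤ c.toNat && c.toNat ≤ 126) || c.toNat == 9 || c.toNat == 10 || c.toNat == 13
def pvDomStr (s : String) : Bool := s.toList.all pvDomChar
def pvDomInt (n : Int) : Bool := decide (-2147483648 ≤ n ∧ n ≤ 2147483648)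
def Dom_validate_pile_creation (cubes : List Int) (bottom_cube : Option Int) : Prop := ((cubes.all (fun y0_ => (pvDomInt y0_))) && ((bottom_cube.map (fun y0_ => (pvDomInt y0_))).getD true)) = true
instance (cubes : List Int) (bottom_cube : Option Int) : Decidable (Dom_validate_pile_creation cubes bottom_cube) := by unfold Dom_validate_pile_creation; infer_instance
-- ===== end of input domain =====

-- B replaces A's repeated cubes.pop(0)/pop() greedy with a two-pointer index scan over the
-- unchanged list (objective: alternative; A mutates its cubes argument in place, B does not —
-- the equivalence proved here is about the return value only).

-- ===== PORT A =====
-- take_longer_cube: returns (picked cube, remaining list); pop(0) = drop 1, pop() = dropLast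
def take_longer_cube (cubes : List Int) : Int × List Int :=
  if cubes.length = 1 then ((PySem.List.pyGetD cubes 0 0), [])
  else
    let left_cube := PySem.List.pyGetD cubes 0 0
    let right_cube := PySem.List.pyGetD cubes (-1) 0
    if left_cube ≥ right_cube then (left_cube, cubes.drop 1)
    else (right_cube, cubes.dropLast)

theorem take_longer_cube_shrinks (cubes : List Int) (h : cubes ≠ []) :
    (take_longer_cube cubes).2.length < cubes.length := by
  have hl : 0 < cubes.length := List.length_pos_iff.mpr h
  unfold take_longer_cube
  split
  · simpa
  · dsimp only
    split
    · simp; omega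
    · simp [List.length_dropLast]; omega

-- the while-loop of A
def validate_pile_loop (cubes : List Int) (bottom_cube : Option Int) : String :=
  if h : cubes = [] then "Yes"
  else
    let p := take_longer_cube cubes
    if (match bottom_cube with | none => true | some b => decide (b ≥ p.1)) then
      validate_pile_loop p.2 (some p.1)
    else "No"
termination_by cubes.length
decreasing_by exact take_longer_cube_shrinks cubes h

def validate_pile_creation (cubes : List Int) (bottom_cube : Option Int) : String :=
  validate_pile_loop cubes bottom_cube

-- ===== PORT B =====
-- the two-pointer while-loop of B
def validate_alt_loop (cubes : List Int) (i j : Int) (bottom_cube : Option Int) : String :=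
  if h : i ≤ j then
    let left := PySem.List.pyGetD cubes i 0
    let right := PySem.List.pyGetD cubes j 0
    let s : Int × Int × Int := if left ≥ right then (left, i + 1, j) else (right, i, j - 1)
    if (match bottom_cube with | some b => decide (b < s.1) | none => false) then "No"
    else validate_alt_loop cubes s.2.1 s.2.2 (some s.1)
  else "Yes"
termination_by (j - i + 1).toNat
decreasing_by
  split <;> dsimp only <;> omega

def validate_pile_creation_alt (cubes : List Int) (bottom_cube : Option Int) : String :=
  validate_alt_loop cubes 0 ((cubes.length : Int) - 1) bottom_cube

-- ===== PRECONDITION & SPEC =====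
def Spec_validate_pile_creation (cubes : List Int) (bottom_cube : Option Int) (out : String) : Prop := out = validate_pile_creation_alt cubes bottom_cube
instance (cubes : List Int) (bottom_cube : Option Int) (out : String) : Decidable (Spec_validate_pile_creation cubes bottom_cube out) := by unfold Spec_validate_pile_creation; infer_instance

-- ===== CLAIM (what is proved, stated in full; the proofs are below) =====
def Claim_equal_validate_pile_creation : Prop := ∀ (cubes : List Int) (bottom_cube : Option Int), Dom_validate_pile_creation cubes bottom_cube → Spec_validate_pile_creation cubes bottom_cube (validate_pile_creation cubes bottom_cube)

-- ===== LEMMAS AND PROOFS =====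

-- the sublist of cubes still alive at pointers (i, j)
def pvRegion (xs : List Int) (i j : Int) : List Int :=
  (xs.drop i.toNat).take (j + 1 - i).toNat

theorem pvRegion_length (xs : List Int) (i j : Int) (hi : 0 ≤ i) (hj : j < xs.length) :
    (pvRegion xs i j).length = (j + 1 - i).toNat := by
  simp [pvRegion]; omega

theorem pvRegion_head (xs : List Int) (i j : Int) (hi : 0 ≤ i) (hij : i ≤ j)
    (hj : j < xs.length) :
    PySem.List.pyGetD (pvRegion xs i j) 0 0 = PySem.List.pyGetD xs i 0 := by
  have h1 : PySem.List.pyGetD xs i 0 = xs[i.toNat] :=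
    PySem.List.pyGetD_eq_getElem xs 0 hi (by omega)
  have hlen : 0 < (pvRegion xs i j).length := by
    rw [pvRegion_length xs i j hi hj]; omega
  have h2 : PySem.List.pyGetD (pvRegion xs i j) 0 0 = (pvRegion xs i j)[(0:Int).toNat] :=
    PySem.List.pyGetD_eq_getElem _ 0 (by omega) (by exact_mod_cast hlen)
  rw [h1, h2]
  simp [pvRegion]

theorem pvRegion_last (xs : List Int) (i j : Int) (hi : 0 ≤ i) (hij : i ≤ j)
    (hj : j < xs.length) :
    PySem.List.pyGetD (pvRegion xs i j) (-1) 0 = PySem.List.pyGetD xs j 0 := by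
  have hlen : (pvRegion xs i j).length = (j + 1 - i).toNat := pvRegion_length xs i j hi hj
  have hne : pvRegion xs i j ≠ [] := by
    intro h; rw [h] at hlen; simp at hlen; omega
  have h1 : PySem.List.pyGetD xs j 0 = xs[j.toNat] :=
    PySem.List.pyGetD_eq_getElem xs 0 (by omega) hj
  rw [PySem.List.pyGetD_neg_one _ _ hne, h1, List.getLast_eq_getElem]
  simp only [pvRegion] at hlen ⊢
  rw [List.getElem_take, List.getElem_drop]
  congr 1
  omega

theorem pvRegion_advance_left (xs : List Int) (i j : Int) (hi : 0 ≤ i) (hij : i ≤ j)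
    (hj : j < xs.length) :
    pvRegion xs (i + 1) j = (pvRegion xs i j).drop 1 := by
  simp only [pvRegion, List.drop_take]
  rw [show (i + 1).toNat = i.toNat + 1 by omega, ← List.drop_drop]
  congr 1
  omega

theorem pvRegion_advance_right (xs : List Int) (i j : Int) (hi : 0 ≤ i) (hij : i ≤ j)
    (hj : j < xs.length) :
    pvRegion xs i (j - 1) = (pvRegion xs i j).dropLast := by
  have hlen : (pvRegion xs i j).length = (j + 1 - i).toNat := pvRegion_length xs i j hi hj
  rw [List.dropLast_eq_take, hlen]
  simp only [pvRegion, List.take_take]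
  congr 1
  omega

theorem pvRegion_empty (xs : List Int) (i j : Int) (h : j < i) : pvRegion xs i j = [] := by
  simp [pvRegion]
  omega

-- main invariant: the two-pointer loop computes A's loop on the live region
theorem loop_agree (n : ℕ) : ∀ (xs : List Int) (i j : Int) (b : Option Int),
    0 ≤ i → j < xs.length → (j + 1 - i).toNat = n →
    validate_pile_loop (pvRegion xs i j) b = validate_alt_loop xs i j b := by
  induction n with
  | zero =>
    intro xs i j b hi hj hn
    have hij : j < i := by omega
    rw [pvRegion_empty xs i j hij]
    rw [validate_pile_loop, validate_alt_loop]
    simp [show ¬ i ≤ j by omega]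
  | succ n ih =>
    intro xs i j b hi hj hn
    have hij : i ≤ j := by omega
    have hlen : (pvRegion xs i j).length = (j + 1 - i).toNat := pvRegion_length xs i j hi hj
    have hne : pvRegion xs i j ≠ [] := by
      intro h; rw [h] at hlen; simp at hlen; omega
    rw [validate_pile_loop, validate_alt_loop]
    rw [dif_neg hne, dif_pos hij]
    by_cases h1 : (pvRegion xs i j).length = 1
    · -- i = j : A takes the single (left) cube; B compares the element with itself, goes left
      have hij' : i = j := by rw [hlen] at h1; omega
      subst hij'
      set L := PySem.List.pyGetD xs i 0 with hL
      have htl : take_longer_cube (pvRegion xs i i) = (L, []) := by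
        unfold take_longer_cube; rw [if_pos h1, pvRegion_head xs i i hi le_rfl hj]
      rw [htl]
      have heq : validate_pile_loop ([] : List Int) (some L) =
          validate_alt_loop xs (i + 1) i (some L) := by
        rw [← pvRegion_empty xs (i + 1) i (by omega)]
        exact ih xs (i + 1) i (some L) (by omega) hj (by omega)
      cases b with
      | none => simpa using heq
      | some bv =>
        by_cases hb : bv ≥ L
        · simpa [hb, show ¬ bv < L by omega] using heq
        · simp [hb, show bv < L by omega]
    · -- i < j : two genuine ends
      set L := PySem.List.pyGetD xs i 0 with hL
      set R := PySem.List.pyGetD xs j 0 with hR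
      have htl : take_longer_cube (pvRegion xs i j) =
          if L ≥ R then (L, (pvRegion xs i j).drop 1) else (R, (pvRegion xs i j).dropLast) := by
        unfold take_longer_cube
        rw [if_neg h1, pvRegion_head xs i j hi hij hj, pvRegion_last xs i j hi hij hj]
      rw [htl]
      by_cases hLR : L ≥ R
      · rw [if_pos hLR]
        have hrec : validate_pile_loop ((pvRegion xs i j).drop 1) (some L) =
            validate_alt_loop xs (i + 1) j (some L) := by
          rw [← pvRegion_advance_left xs i j hi hij hj]
          exact ih xs (i + 1) j (some L) (by omega) hj (by omega)
        cases b with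
        | none => simpa [hLR] using hrec
        | some bv =>
          by_cases hb : bv ≥ L
          · simpa [hLR, hb, show ¬ bv < L by omega] using hrec
          · simp [hLR, hb, show bv < L by omega]
      · rw [if_neg hLR]
        have hrec : validate_pile_loop ((pvRegion xs i j).dropLast) (some R) =
            validate_alt_loop xs i (j - 1) (some R) := by
          rw [← pvRegion_advance_right xs i j hi hij hj]
          exact ih xs i (j - 1) (some R) hi (by omega) (by omega)
        cases b with
        | none => simpa [hLR] using hrec
        | some bv =>
          by_cases hb : bv ≥ R
          · simpa [hLR, hb, show ¬ bv < R by omega] using hrec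
          · simp [hLR, hb, show bv < R by omega]

-- ===== VERDICT (by name: the statement is the Claim_ definition above) =====
theorem validate_pile_creation_spec : Claim_equal_validate_pile_creation := by
  intro cubes bottom_cube _
  unfold Spec_validate_pile_creation validate_pile_creation validate_pile_creation_alt
  have := loop_agree ((cubes.length : Int) - 1 + 1 - 0).toNat cubes 0 ((cubes.length : Int) - 1)
      bottom_cube (le_refl 0) (by omega) rfl
  rw [← this]
  congr 1
  simp [pvRegion]
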